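-- pv_equiv track=rewrite | github.com/IA-Generative/openrag | openrag/components/auth/middleware.py | is_ui_path
-- ===== SOURCE A (Python) =====
-- _API_PREFIXES = (
--     "/v1/",
--     "/indexer/",
--     "/search/",
--     "/users/",
--     "/partition/",
--     "/workspaces/",
--     "/queue/",
--     "/extract/",
--     "/actors/",
--     "/monitoring/",
--     "/tools/",
-- )
--
-- _UI_PATH_PREFIXES = ("/static",)
--
-- def is_ui_path(path: str) -> bool:
--     """True if this path is a browser-facing page (UI), not an API route.
--
--     Used only in ``AUTH_MODE=oidc`` to decide between a 302 redirect to
--     ``/auth/login`` (UI) and a 401 JSON response (API). When in doubt we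
--     return ``False`` to avoid redirect loops on non-browser clients.
--     """
--     if path == "/":
--         return True
--     if any(path.startswith(p) for p in _API_PREFIXES):
--         return False
--     if any(path.startswith(p) for p in _UI_PATH_PREFIXES):
--         return True
--     return False
-- ===== SOURCE B (Python) =====
-- _UI_PATH_PREFIXES = ("/static",)
--
-- def is_ui_path(path: str) -> bool:
--     # The API-prefix branch in the original is logically inert: no API prefix
--     # can overlap with "/" or "/static", so the predicate is a closed form.
--     return path == "/" or path.startswith(_UI_PATH_PREFIXES)
-- ===== Notes on version B (the rewrite author's own statement) =====
-- stated objective: simpler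
-- what changed: Drops the entire API-prefix loop (provably dead: an API-prefixed path can never start with '/static' or equal '/', so that branch only ever reaffirms the default False) and collapses the predicate to a single closed-form boolean over the UI prefixes.
import Mathlib
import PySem

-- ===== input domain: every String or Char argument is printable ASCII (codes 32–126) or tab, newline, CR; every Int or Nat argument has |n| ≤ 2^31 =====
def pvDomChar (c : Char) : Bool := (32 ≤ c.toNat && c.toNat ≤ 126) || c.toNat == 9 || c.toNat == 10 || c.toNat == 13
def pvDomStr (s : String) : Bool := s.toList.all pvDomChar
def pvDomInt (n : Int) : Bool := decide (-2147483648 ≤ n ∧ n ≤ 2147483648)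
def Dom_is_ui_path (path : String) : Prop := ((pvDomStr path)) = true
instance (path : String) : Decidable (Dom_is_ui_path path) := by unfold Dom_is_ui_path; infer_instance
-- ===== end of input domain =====

-- B drops the API-prefix loop of A (provably dead code) and returns the closed form
-- path == "/" or path.startswith("/static"); objective: simpler.

-- ===== PORT A =====
def apiPrefixes : List String :=
  ["/v1/", "/indexer/", "/search/", "/users/", "/partition/", "/workspaces/",
   "/queue/", "/extract/", "/actors/", "/monitoring/", "/tools/"]

def uiPathPrefixes : List String := ["/static"]

def is_ui_path (path : String) : Bool :=
  if path == "/" then true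
  else if apiPrefixes.any (fun p => PySem.Str.startswith path p) then false
  else if uiPathPrefixes.any (fun p => PySem.Str.startswith path p) then true
  else false

-- ===== PORT B =====
def is_ui_path_alt (path : String) : Bool :=
  path == "/" || PySem.Str.startswith path "/static"

-- ===== PRECONDITION & SPEC =====
def Spec_is_ui_path (path : String) (out : Bool) : Prop := out = is_ui_path_alt path
instance (path : String) (out : Bool) : Decidable (Spec_is_ui_path path out) := by unfold Spec_is_ui_path; infer_instance

-- ===== CLAIM (what is proved, stated in full; the proofs are below) =====
def Claim_equal_is_ui_path : Prop := ∀ (path : String), Dom_is_ui_path path → Spec_is_ui_path path (is_ui_path path)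

-- ===== LEMMAS AND PROOFS =====

-- If path starts with any API prefix, it cannot start with "/static".
theorem api_not_static (path : String)
    (h : apiPrefixes.any (fun p => PySem.Str.startswith path p) = true) :
    PySem.Str.startswith path "/static" = false := by
  rw [Bool.eq_false_iff]
  intro hs
  rw [PySem.Str.startswith_eq, PySem.Chars.startswith_iff] at hs
  simp only [apiPrefixes, List.any_cons, List.any_nil, Bool.or_eq_true, Bool.or_false,
    PySem.Str.startswith_eq, PySem.Chars.startswith_iff] at h
  have e0 : "/static".toList = ['/','s','t','a','t','i','c'] := by decide
  have e1 : "/v1/".toList = ['/','v','1','/'] := by decide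
  have e2 : "/indexer/".toList = ['/','i','n','d','e','x','e','r','/'] := by decide
  have e3 : "/search/".toList = ['/','s','e','a','r','c','h','/'] := by decide
  have e4 : "/users/".toList = ['/','u','s','e','r','s','/'] := by decide
  have e5 : "/partition/".toList = ['/','p','a','r','t','i','t','i','o','n','/'] := by decide
  have e6 : "/workspaces/".toList = ['/','w','o','r','k','s','p','a','c','e','s','/'] := by decide
  have e7 : "/queue/".toList = ['/','q','u','e','u','e','/'] := by decide
  have e8 : "/extract/".toList = ['/','e','x','t','r','a','c','t','/'] := by decide
  have e9 : "/actors/".toList = ['/','a','c','t','o','r','s','/'] := by decide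
  have e10 : "/monitoring/".toList = ['/','m','o','n','i','t','o','r','i','n','g','/'] := by decide
  have e11 : "/tools/".toList = ['/','t','o','o','l','s','/'] := by decide
  rw [e0] at hs
  simp only [e1, e2, e3, e4, e5, e6, e7, e8, e9, e10, e11] at h
  rcases h with h|h|h|h|h|h|h|h|h|h|h <;>
    · obtain ⟨t, ht⟩ := h
      rw [← ht] at hs
      simp [List.cons_prefix_cons] at hs

-- ===== VERDICT (by name: the statement is the Claim_ definition above) =====
theorem is_ui_path_spec : Claim_equal_is_ui_path := by
  unfold Claim_equal_is_ui_path Spec_is_ui_path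
  intro path _
  unfold is_ui_path is_ui_path_alt
  by_cases hp : path = "/"
  · simp [hp]
  · rw [if_neg (by simpa using hp)]
    by_cases ha : apiPrefixes.any (fun p => PySem.Str.startswith path p) = true
    · rw [if_pos ha]
      have h2 : PySem.Chars.startswith path.toList ['/','s','t','a','t','i','c'] = false := by
        simpa using api_not_static path ha
      simp [hp, h2]
    · rw [if_neg ha]
      simp [uiPathPrefixes, beq_iff_eq, hp]
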